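-- pv_equiv track=rewrite | github.com/akkerman/advent_of_code | 2020/11.py | part_one
-- ===== SOURCE A (Python) =====
-- offsets = [
--     (-1, -1), (-1, 0), (-1, 1),
--     (0, -1), (0, 1),
--     (1, -1), (1, 0), (1, 1),
--     ]
--
-- def adjacent_seats(seat):
--     r, c = seat
--     return {(r+dr, c+dc) for dr, dc in offsets}
--
-- def part_one(seats):
--     """ part one """
--     occupied = set()
--     rounds = 0
--     while True:
--         rounds += 1
--         new_occupied = set(occupied)
--         for seat in seats:
--             possible_seats = seats & adjacent_seats(seat)
--
--             if seat in occupied: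
--                 if len(possible_seats & occupied) >= 4:
--                     new_occupied.remove(seat)
--             else:
--                 free_seats = possible_seats - occupied
--                 if free_seats == possible_seats:
--                     new_occupied.add(seat)
--
--         if occupied == new_occupied:
--             return len(occupied)
--
--         occupied = new_occupied
-- ===== SOURCE B (Python) =====
-- offsets = [
--     (-1, -1), (-1, 0), (-1, 1),
--     (0, -1), (0, 1),
--     (1, -1), (1, 0), (1, 1),
--     ]
--
-- def part_one(seats):
--     """ part one """
--     seats = set(seats)
--     neighbors = {s: [(s[0] + dr, s[1] + dc) for dr, dc in offsets
--                      if (s[0] + dr, s[1] + dc) in seats] for s in seats}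
--     counts = {s: 0 for s in seats}
--     occupied = set()
--     while True:
--         turn_on = [s for s in seats if s not in occupied and counts[s] == 0]
--         turn_off = [s for s in occupied if counts[s] >= 4]
--         if not turn_on and not turn_off:
--             return len(occupied)
--         for s in turn_on:
--             occupied.add(s)
--             for n in neighbors[s]:
--                 counts[n] += 1
--         for s in turn_off:
--             occupied.discard(s)
--             for n in neighbors[s]:
--                 counts[n] -= 1
-- ===== Notes on version B (the rewrite author's own statement) =====
-- stated objective: faster
-- what changed: Instead of rescanning every seat's adjacency-set intersections each round, B precomputes a neighbor table once and incrementally maintains a per-seat occupied-neighbor count, each round flipping (simultaneously) only the seats the counts mark and updating the affected neighbors' counts.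
import Mathlib
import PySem

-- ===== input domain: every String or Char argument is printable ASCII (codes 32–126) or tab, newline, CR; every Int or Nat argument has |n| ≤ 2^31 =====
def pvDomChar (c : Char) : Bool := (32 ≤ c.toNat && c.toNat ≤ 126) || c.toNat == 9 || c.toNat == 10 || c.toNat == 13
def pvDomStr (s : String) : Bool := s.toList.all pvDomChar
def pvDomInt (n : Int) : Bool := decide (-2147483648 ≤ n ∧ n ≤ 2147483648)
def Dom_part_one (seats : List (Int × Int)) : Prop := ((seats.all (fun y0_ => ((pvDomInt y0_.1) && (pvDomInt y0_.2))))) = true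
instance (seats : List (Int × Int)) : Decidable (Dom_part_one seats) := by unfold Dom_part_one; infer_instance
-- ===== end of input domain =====

-- B replaces A's per-round rescan of every seat's adjacency-set intersections by a precomputed
-- neighbor table plus an incrementally maintained occupied-neighbor count per seat, flipping the
-- marked seats in batches; the ports run the same rounds with the same fuel, so they are proved
-- equal on every input (both Python loops run the identical round sequence; the fueled ports
-- return 0 only where the round sequence repeats a state, i.e. where both Pythons loop forever).

-- ===== PORT A =====
def pvOffsets : List (Int × Int) :=
  [(-1, -1), (-1, 0), (-1, 1), (0, -1), (0, 1), (1, -1), (1, 0), (1, 1)]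

def adjacent_seats (seat : Int × Int) : PySem.Set (Int × Int) :=
  PySem.Set.ofList (pvOffsets.map (fun d => (seat.1 + d.1, seat.2 + d.2)))

-- the body of A's 'for seat in seats' loop
def stepA (S occ acc : PySem.Set (Int × Int)) (seat : Int × Int) : PySem.Set (Int × Int) :=
  let possible := PySem.Set.inter S (adjacent_seats seat)
  if PySem.Set.contains occ seat then
    if 4 ≤ (PySem.Set.inter possible occ).length then
      -- new_occupied.remove(seat): seat is always present here (distinct seats, handled once)
      PySem.Set.discard acc seat
    else acc
  else
    if PySem.Set.equal (PySem.Set.diff possible occ) possible then PySem.Set.add acc seat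
    else acc

-- one round: new_occupied = set(occupied), then the for-loop
def partOneRound (S occ : PySem.Set (Int × Int)) : PySem.Set (Int × Int) :=
  S.foldl (stepA S occ) occ

-- A's 'while True' with fuel: a terminating Python run reaches its fixpoint in ≤ 2^|seats| rounds
-- (the states are subsets of seats and a repeated state means Python loops forever), so the 0
-- branch is reached only where the Python diverges.
def partOneLoop (S occ : PySem.Set (Int × Int)) : Nat → Int
  | 0 => 0
  | fuel + 1 =>
    let new_occupied := partOneRound S occ
    if PySem.Set.equal occ new_occupied then (occ.length : Int)
    else partOneLoop S new_occupied fuel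

def part_one (seats : List (Int × Int)) : Int :=
  let S := PySem.Set.ofList seats
  partOneLoop S PySem.Set.empty (2 ^ S.length + 1)

-- ===== PORT B =====
-- [(s[0]+dr, s[1]+dc) for dr, dc in offsets if … in seats]
def nbList (S : PySem.Set (Int × Int)) (s : Int × Int) : List (Int × Int) :=
  (pvOffsets.map (fun d => (s.1 + d.1, s.2 + d.2))).filter (fun n => PySem.Set.contains S n)

def nbDict (S : PySem.Set (Int × Int)) : PySem.Dict (Int × Int) (List (Int × Int)) :=
  S.foldl (fun d s => d.insert s (nbList S s)) PySem.Dict.empty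

def countsInit (S : PySem.Set (Int × Int)) : PySem.Dict (Int × Int) Int :=
  S.foldl (fun d s => d.insert s 0) PySem.Dict.empty

-- 'for n in neighbors[s]: counts[n] += 1' (every n is a key, so the default is never taken)
def incNbrs (nbd : PySem.Dict (Int × Int) (List (Int × Int)))
    (c : PySem.Dict (Int × Int) Int) (s : Int × Int) : PySem.Dict (Int × Int) Int :=
  (nbd.getD s []).foldl (fun c n => c.modify n 0 (· + 1)) c

def decNbrs (nbd : PySem.Dict (Int × Int) (List (Int × Int)))
    (c : PySem.Dict (Int × Int) Int) (s : Int × Int) : PySem.Dict (Int × Int) Int :=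
  (nbd.getD s []).foldl (fun c n => c.modify n 0 (· - 1)) c

-- B's 'while True' with the same fuel as A's port
def altLoop (S : PySem.Set (Int × Int)) (nbd : PySem.Dict (Int × Int) (List (Int × Int)))
    (occ : PySem.Set (Int × Int)) (counts : PySem.Dict (Int × Int) Int) : Nat → Int
  | 0 => 0
  | fuel + 1 =>
    let turnOn := S.filter (fun s => !(PySem.Set.contains occ s) && (counts.getD s 0 == 0))
    let turnOff := occ.filter (fun s => decide (4 ≤ counts.getD s 0))
    if turnOn.isEmpty && turnOff.isEmpty then (occ.length : Int)
    else
      let st1 := turnOn.foldl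
        (fun (st : PySem.Set (Int × Int) × PySem.Dict (Int × Int) Int) s =>
          (PySem.Set.add st.1 s, incNbrs nbd st.2 s)) (occ, counts)
      let st2 := turnOff.foldl
        (fun (st : PySem.Set (Int × Int) × PySem.Dict (Int × Int) Int) s =>
          (PySem.Set.discard st.1 s, decNbrs nbd st.2 s)) st1
      altLoop S nbd st2.1 st2.2 fuel

def part_one_alt (seats : List (Int × Int)) : Int :=
  let S := PySem.Set.ofList seats
  altLoop S (nbDict S) PySem.Set.empty (countsInit S) (2 ^ S.length + 1)

-- ===== PRECONDITION & SPEC =====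
def Spec_part_one (seats : List (Int × Int)) (out : Int) : Prop := out = part_one_alt seats
instance (seats : List (Int × Int)) (out : Int) : Decidable (Spec_part_one seats out) := by
  unfold Spec_part_one; infer_instance

-- ===== CLAIM (what is proved, stated in full; the proofs are below) =====
def Claim_equal_part_one : Prop := ∀ (seats : List (Int × Int)), Dom_part_one seats →
  Spec_part_one seats (part_one seats)

-- ===== LEMMAS AND PROOFS =====

-- the 8 adjacent cells, written out
def shiftLit (s : Int × Int) : List (Int × Int) :=
  [(s.1 + -1, s.2 + -1), (s.1 + -1, s.2 + 0), (s.1 + -1, s.2 + 1), (s.1 + 0, s.2 + -1),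
   (s.1 + 0, s.2 + 1), (s.1 + 1, s.2 + -1), (s.1 + 1, s.2 + 0), (s.1 + 1, s.2 + 1)]

theorem shift_eq_lit (s : Int × Int) :
    pvOffsets.map (fun d => (s.1 + d.1, s.2 + d.2)) = shiftLit s := rfl

theorem shift_symm (s t : Int × Int) : t ∈ shiftLit s ↔ s ∈ shiftLit t := by
  simp [shiftLit, Prod.ext_iff]; omega

-- number of occupied neighbors of x (count over the occupied list)
def cnt (occ : List (Int × Int)) (x : Int × Int) : Nat :=
  occ.countP (fun t => decide (t ∈ shiftLit x))

-- the (old-state) decision for a seat of S: occupied in the next round?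
def decNext (occ : List (Int × Int)) (x : Int × Int) : Bool :=
  if x ∈ occ then decide (cnt occ x < 4) else decide (cnt occ x = 0)

-- two nodup lists with the same members have equal countP / length
theorem countP_eq_of_mem_iff (l₁ l₂ : List (Int × Int)) (p : (Int × Int) → Bool)
    (h₁ : l₁.Nodup) (h₂ : l₂.Nodup) (h : ∀ x, x ∈ l₁ ↔ x ∈ l₂) :
    l₁.countP p = l₂.countP p :=
  ((List.perm_ext_iff_of_nodup h₁ h₂).2 h).countP_eq p

theorem cnt_congr (occ₁ occ₂ : List (Int × Int)) (h₁ : occ₁.Nodup) (h₂ : occ₂.Nodup)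
    (h : ∀ x, x ∈ occ₁ ↔ x ∈ occ₂) (x : Int × Int) : cnt occ₁ x = cnt occ₂ x :=
  countP_eq_of_mem_iff occ₁ occ₂ _ h₁ h₂ h

theorem length_eq_of_mem_iff (l₁ l₂ : List (Int × Int))
    (h₁ : l₁.Nodup) (h₂ : l₂.Nodup) (h : ∀ x, x ∈ l₁ ↔ x ∈ l₂) : l₁.length = l₂.length :=
  ((List.perm_ext_iff_of_nodup h₁ h₂).2 h).length_eq

theorem mem_adjacent (s t : Int × Int) : t ∈ adjacent_seats s ↔ t ∈ shiftLit s := by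
  rw [adjacent_seats, shift_eq_lit]; exact PySem.Set.mem_ofList _ _

-- A's occupied-neighbor length equals cnt
theorem lenA_eq_cnt (S occ : PySem.Set (Int × Int)) (hS : S.Nodup) (hnd : occ.Nodup)
    (hsub : ∀ x ∈ occ, x ∈ S) (s : Int × Int) :
    (PySem.Set.inter (PySem.Set.inter S (adjacent_seats s)) occ).length = cnt occ s := by
  have hnd1 : (PySem.Set.inter (PySem.Set.inter S (adjacent_seats s)) occ).Nodup :=
    PySem.Set.nodup_inter _ _ (PySem.Set.nodup_inter _ _ hS)
  have hnd2 : (occ.filter (fun t => decide (t ∈ shiftLit s))).Nodup := hnd.filter _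
  have hm : ∀ x, x ∈ PySem.Set.inter (PySem.Set.inter S (adjacent_seats s)) occ ↔
      x ∈ occ.filter (fun t => decide (t ∈ shiftLit s)) := by
    intro x
    simp only [PySem.Set.mem_inter, List.mem_filter, mem_adjacent, decide_eq_true_eq]
    constructor
    · rintro ⟨⟨_, h2⟩, h3⟩; exact ⟨h3, h2⟩
    · rintro ⟨h3, h2⟩; exact ⟨⟨hsub x h3, h2⟩, h3⟩
  rw [length_eq_of_mem_iff _ _ hnd1 hnd2 hm, cnt, List.countP_eq_length_filter]

-- A's 'free_seats == possible_seats' test equals 'cnt occ s = 0'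
theorem freeA_iff (S occ : PySem.Set (Int × Int)) (hsub : ∀ x ∈ occ, x ∈ S) (s : Int × Int) :
    PySem.Set.equal (PySem.Set.diff (PySem.Set.inter S (adjacent_seats s)) occ)
      (PySem.Set.inter S (adjacent_seats s)) = true ↔ cnt occ s = 0 := by
  rw [PySem.Set.equal_iff, cnt, List.countP_eq_zero]
  constructor
  · intro h t ht
    simp only [decide_eq_true_eq]
    intro hadj
    have hmemP : t ∈ PySem.Set.inter S (adjacent_seats s) :=
      (PySem.Set.mem_inter _ _ _).2 ⟨hsub t ht, (mem_adjacent s t).2 hadj⟩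
    exact ((PySem.Set.mem_diff _ _ _).1 ((h t).2 hmemP)).2 ht
  · intro h0 t
    rw [PySem.Set.mem_diff]
    constructor
    · rintro ⟨h1, _⟩; exact h1
    · intro h1
      refine ⟨h1, fun hocc => ?_⟩
      have hnadj := h0 t hocc
      have hadj := ((PySem.Set.mem_inter _ _ _).1 h1).2
      exact hnadj (by simpa using (mem_adjacent s t).1 hadj)

-- one application of A's loop body: it flips only its own seat, per the old-state decision
theorem stepA_one (S occ acc : PySem.Set (Int × Int)) (a : Int × Int)
    (hS : S.Nodup) (hnd : occ.Nodup) (hsub : ∀ x ∈ occ, x ∈ S)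
    (haccnd : acc.Nodup) (haga : a ∈ acc ↔ a ∈ occ) :
    (stepA S occ acc a).Nodup ∧ ((a ∈ stepA S occ acc a) ↔ decNext occ a = true) ∧
    (∀ x, x ≠ a → ((x ∈ stepA S occ acc a) ↔ x ∈ acc)) := by
  have hlen := lenA_eq_cnt S occ hS hnd hsub a
  by_cases hocc : a ∈ occ
  · have hc : PySem.Set.contains occ a = true := (PySem.Set.contains_iff _ _).2 hocc
    by_cases hrem : 4 ≤ (PySem.Set.inter (PySem.Set.inter S (adjacent_seats a)) occ).length
    · have hstep : stepA S occ acc a = PySem.Set.discard acc a := by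
        simp only [stepA, hc, if_true]
        rw [if_pos hrem]
      have hdec : decNext occ a = false := by
        rw [decNext, if_pos hocc]
        simp only [decide_eq_false_iff_not, not_lt]
        omega
      refine ⟨by rw [hstep]; exact PySem.Set.nodup_discard acc a haccnd, ?_, ?_⟩
      · rw [hstep, hdec, PySem.Set.mem_discard]; simp
      · intro x hx; rw [hstep, PySem.Set.mem_discard]; simp [hx]
    · have hstep : stepA S occ acc a = acc := by
        simp only [stepA, hc, if_true]
        rw [if_neg hrem]
      have hdec : decNext occ a = true := by
        rw [decNext, if_pos hocc]
        simp only [decide_eq_true_eq]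
        omega
      exact ⟨by rw [hstep]; exact haccnd, by rw [hstep, hdec]; simpa using haga.2 hocc,
        fun x _ => by rw [hstep]⟩
  · have hc : PySem.Set.contains occ a = false := by
      simp [hocc]
    have hfree := freeA_iff S occ hsub a
    by_cases hadd : PySem.Set.equal
        (PySem.Set.diff (PySem.Set.inter S (adjacent_seats a)) occ)
        (PySem.Set.inter S (adjacent_seats a)) = true
    · have hstep : stepA S occ acc a = PySem.Set.add acc a := by
        simp only [stepA, hc, Bool.false_eq_true, if_false]
        rw [if_pos hadd]
      have hdec : decNext occ a = true := by
        rw [decNext, if_neg hocc]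
        simpa using hfree.1 hadd
      refine ⟨by rw [hstep]; exact PySem.Set.nodup_add acc a haccnd, ?_, ?_⟩
      · rw [hstep, hdec, PySem.Set.mem_add]; simp
      · intro x hx; rw [hstep, PySem.Set.mem_add]; simp [hx]
    · have hstep : stepA S occ acc a = acc := by
        simp only [stepA, hc, Bool.false_eq_true, if_false]
        rw [if_neg hadd]
      have hdec : decNext occ a = false := by
        rw [decNext, if_neg hocc]
        simp only [decide_eq_false_iff_not]
        exact fun h0 => hadd (hfree.2 h0)
      have hna : a ∉ acc := fun h => hocc (haga.1 h)
      exact ⟨by rw [hstep]; exact haccnd, by rw [hstep, hdec]; simpa using hna, fun x _ => by rw [hstep]⟩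

-- the whole for-loop, by induction: simultaneous update from the old state
theorem stepA_char (S occ : PySem.Set (Int × Int)) (hS : S.Nodup) (hnd : occ.Nodup)
    (hsub : ∀ x ∈ occ, x ∈ S) (l : List (Int × Int)) (acc : PySem.Set (Int × Int))
    (hl : l.Nodup) (hacc : acc.Nodup) (hag : ∀ s ∈ l, (s ∈ acc ↔ s ∈ occ)) :
    (l.foldl (stepA S occ) acc).Nodup ∧
    ∀ x, x ∈ l.foldl (stepA S occ) acc ↔
      ((x ∈ l ∧ decNext occ x = true) ∨ (x ∉ l ∧ x ∈ acc)) := by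
  induction l generalizing acc with
  | nil => exact ⟨hacc, by simp⟩
  | cons a l ih =>
    have hanl : a ∉ l := (List.nodup_cons.1 hl).1
    have hlnd : l.Nodup := (List.nodup_cons.1 hl).2
    obtain ⟨hnd', hadec, hother⟩ :=
      stepA_one S occ acc a hS hnd hsub hacc (hag a List.mem_cons_self)
    have hag' : ∀ s ∈ l, (s ∈ stepA S occ acc a ↔ s ∈ occ) := fun s hs =>
      (hother s (fun h => hanl (h ▸ hs))).trans (hag s (List.mem_cons_of_mem a hs))
    obtain ⟨hnd2, hchar⟩ := ih (stepA S occ acc a) hlnd hnd' hag'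
    rw [List.foldl_cons]
    refine ⟨hnd2, fun x => ?_⟩
    rw [hchar x]
    by_cases hxa : x = a
    · subst hxa
      constructor
      · rintro (⟨hxl, _⟩ | ⟨_, hx⟩)
        · exact absurd hxl hanl
        · exact Or.inl ⟨List.mem_cons_self, hadec.1 hx⟩
      · rintro (⟨_, hd⟩ | ⟨hnx, _⟩)
        · exact Or.inr ⟨hanl, hadec.2 hd⟩
        · exact absurd List.mem_cons_self hnx
    · have hoth := hother x hxa
      constructor
      · rintro (⟨hxl, hd⟩ | ⟨hnxl, hx⟩)
        · exact Or.inl ⟨List.mem_cons_of_mem a hxl, hd⟩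
        · exact Or.inr ⟨fun h => (List.mem_cons.1 h).elim hxa hnxl, hoth.1 hx⟩
      · rintro (⟨hxl, hd⟩ | ⟨hnxl, hx⟩)
        · cases List.mem_cons.1 hxl with
          | inl h => exact absurd h hxa
          | inr h => exact Or.inl ⟨h, hd⟩
        · exact Or.inr ⟨fun h => hnxl (List.mem_cons_of_mem a h), hoth.2 hx⟩

theorem roundA_nodup (S occ : PySem.Set (Int × Int)) (hS : S.Nodup) (hnd : occ.Nodup)
    (hsub : ∀ x ∈ occ, x ∈ S) : (partOneRound S occ).Nodup :=
  (stepA_char S occ hS hnd hsub S occ hS hnd (fun _ _ => Iff.rfl)).1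

theorem roundA_mem (S occ : PySem.Set (Int × Int)) (hS : S.Nodup) (hnd : occ.Nodup)
    (hsub : ∀ x ∈ occ, x ∈ S) (x : Int × Int) :
    x ∈ partOneRound S occ ↔ (x ∈ S ∧ decNext occ x = true) := by
  have h := (stepA_char S occ hS hnd hsub S occ hS hnd (fun _ _ => Iff.rfl)).2 x
  rw [partOneRound, h]
  constructor
  · rintro (h | ⟨hns, hocc⟩)
    · exact h
    · exact absurd (hsub x hocc) hns
  · exact Or.inl

-- ===== B-side dictionary lemmas =====
theorem getD_foldl_insert_fun {ν : Type} (f : (Int × Int) → ν) (l : List (Int × Int))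
    (d : PySem.Dict (Int × Int) ν) (x : Int × Int) (dflt : ν) :
    (l.foldl (fun d s => d.insert s (f s)) d).getD x dflt
      = if x ∈ l then f x else d.getD x dflt := by
  induction l generalizing d with
  | nil => simp
  | cons a l ih =>
    simp only [List.foldl_cons, ih, List.mem_cons]
    by_cases hl : x ∈ l
    · simp [hl]
    · by_cases ha : x = a
      · subst ha; simp [hl]
      · simp [hl, ha, PySem.Dict.getD_insert]

theorem getD_countsInit (S : PySem.Set (Int × Int)) (x : Int × Int) :
    (countsInit S).getD x 0 = 0 := by
  unfold countsInit
  rw [getD_foldl_insert_fun (fun _ => (0 : Int)) S PySem.Dict.empty x 0]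
  split
  · rfl
  · exact PySem.Dict.getD_empty x 0

theorem getD_nbDict (S : PySem.Set (Int × Int)) (s : Int × Int) (hs : s ∈ S) :
    (nbDict S).getD s [] = nbList S s := by
  unfold nbDict
  rw [getD_foldl_insert_fun (nbList S) S PySem.Dict.empty s []]
  simp [hs]

theorem nbList_nodup (S : PySem.Set (Int × Int)) (s : Int × Int) : (nbList S s).Nodup := by
  unfold nbList
  rw [shift_eq_lit]
  refine List.Nodup.filter _ ?_
  simp [shiftLit, List.nodup_cons, Prod.ext_iff]

theorem mem_nbList (S : PySem.Set (Int × Int)) (s x : Int × Int) :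
    x ∈ nbList S s ↔ x ∈ shiftLit s ∧ x ∈ S := by
  unfold nbList
  rw [shift_eq_lit]
  simp [List.mem_filter, PySem.Set.contains]

-- 'counts[n] -= 1' over a list of keys
theorem getD_foldl_modify_sub_one (N : List (Int × Int)) (c : PySem.Dict (Int × Int) Int)
    (x : Int × Int) :
    (N.foldl (fun c n => c.modify n 0 (· - 1)) c).getD x 0 = c.getD x 0 - (N.count x : Int) := by
  induction N generalizing c with
  | nil => simp
  | cons a N ih =>
    simp only [List.foldl_cons, ih, List.count_cons]
    rw [PySem.Dict.getD_modify]
    by_cases hxa : x = a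
    · subst hxa
      simp only [BEq.rfl, if_true]
      push_cast
      ring
    · have : (a == x) = false := by simpa using fun h => hxa h.symm
      simp [hxa, this]

-- counts after the increment / decrement folds
theorem getD_inc (nb : (Int × Int) → List (Int × Int)) (l : List (Int × Int))
    (hnodup : ∀ t ∈ l, (nb t).Nodup) (c : PySem.Dict (Int × Int) Int) (x : Int × Int) :
    (l.foldl (fun c t => (nb t).foldl (fun c n => c.modify n 0 (· + 1)) c) c).getD x 0
      = c.getD x 0 + (l.countP (fun t => decide (x ∈ nb t)) : Int) := by
  induction l generalizing c with
  | nil => simp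
  | cons a l ih =>
    simp only [List.foldl_cons, List.countP_cons]
    rw [ih (fun t ht => hnodup t (List.mem_cons_of_mem a ht)),
      PySem.Dict.getD_foldl_modify_add_one]
    by_cases hx : x ∈ nb a
    · rw [List.count_eq_one_of_mem (hnodup a List.mem_cons_self) hx]
      simp only [hx, decide_true, if_true]
      push_cast
      ring
    · rw [List.count_eq_zero.2 hx]
      simp [hx]

theorem getD_dec (nb : (Int × Int) → List (Int × Int)) (l : List (Int × Int))
    (hnodup : ∀ t ∈ l, (nb t).Nodup) (c : PySem.Dict (Int × Int) Int) (x : Int × Int) :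
    (l.foldl (fun c t => (nb t).foldl (fun c n => c.modify n 0 (· - 1)) c) c).getD x 0
      = c.getD x 0 - (l.countP (fun t => decide (x ∈ nb t)) : Int) := by
  induction l generalizing c with
  | nil => simp
  | cons a l ih =>
    simp only [List.foldl_cons, List.countP_cons]
    rw [ih (fun t ht => hnodup t (List.mem_cons_of_mem a ht)), getD_foldl_modify_sub_one]
    by_cases hx : x ∈ nb a
    · rw [List.count_eq_one_of_mem (hnodup a List.mem_cons_self) hx]
      simp only [hx, decide_true, if_true]
      push_cast
      ring
    · rw [List.count_eq_zero.2 hx]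
      simp [hx]

-- occupied after the add / discard folds
theorem mem_foldl_add' (l : List (Int × Int)) (acc : PySem.Set (Int × Int)) (x : Int × Int) :
    x ∈ l.foldl PySem.Set.add acc ↔ x ∈ acc ∨ x ∈ l := by
  induction l generalizing acc with
  | nil => simp
  | cons a l ih => simp [ih, PySem.Set.mem_add]; tauto

theorem nodup_foldl_add' (l : List (Int × Int)) (acc : PySem.Set (Int × Int))
    (h : acc.Nodup) : (l.foldl PySem.Set.add acc).Nodup := by
  induction l generalizing acc with
  | nil => exact h
  | cons a l ih => exact ih _ (PySem.Set.nodup_add acc a h)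

theorem mem_foldl_discard (l : List (Int × Int)) (acc : PySem.Set (Int × Int)) (x : Int × Int) :
    x ∈ l.foldl PySem.Set.discard acc ↔ x ∈ acc ∧ x ∉ l := by
  induction l generalizing acc with
  | nil => simp
  | cons a l ih => simp [ih, PySem.Set.mem_discard]; tauto

theorem nodup_foldl_discard (l : List (Int × Int)) (acc : PySem.Set (Int × Int))
    (h : acc.Nodup) : (l.foldl PySem.Set.discard acc).Nodup := by
  induction l generalizing acc with
  | nil => exact h
  | cons a l ih => exact ih _ (PySem.Set.nodup_discard acc a h)

-- countP partition over a boolean side condition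
theorem countP_partition (l : List (Int × Int)) (p q : (Int × Int) → Bool) :
    l.countP p = l.countP (fun t => p t && q t) + l.countP (fun t => p t && !q t) := by
  induction l with
  | nil => rfl
  | cons a l ih =>
    simp only [List.countP_cons, ih]
    cases hp : p a <;> cases hq : q a <;> simp <;> omega

-- the flip arithmetic: occupied-neighbor count after applying the on/off flips
theorem cnt_after_flips (occ occ' on off : List (Int × Int))
    (hoccnd : occ.Nodup) (hocc'nd : occ'.Nodup) (honnd : on.Nodup) (hoffnd : off.Nodup)
    (hdisj : ∀ t ∈ on, t ∉ occ) (hoffsub : ∀ t ∈ off, t ∈ occ)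
    (hmem : ∀ t, t ∈ occ' ↔ ((t ∈ occ ∨ t ∈ on) ∧ t ∉ off)) (x : Int × Int) :
    (cnt occ' x : Int) = (cnt occ x : Int) + (cnt on x : Int) - (cnt off x : Int) := by
  have hkey : cnt occ' x + cnt off x = cnt occ x + cnt on x := by
    have hM : ∀ t, t ∈ occ' ↔ t ∈ (occ.filter (fun t => !decide (t ∈ off)) ++ on) := by
      intro t
      rw [hmem t]
      simp only [List.mem_append, List.mem_filter, Bool.not_eq_true', decide_eq_false_iff_not]
      constructor
      · rintro ⟨(h1 | h1), h2⟩
        · exact Or.inl ⟨h1, h2⟩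
        · exact Or.inr h1
      · rintro (⟨h1, h2⟩ | h1)
        · exact ⟨Or.inl h1, h2⟩
        · exact ⟨Or.inr h1, fun hoff => hdisj t h1 (hoffsub t hoff)⟩
    have hMnd : (occ.filter (fun t => !decide (t ∈ off)) ++ on).Nodup :=
      List.Nodup.append (hoccnd.filter _) honnd
        (fun t ht1 ht2 => hdisj t ht2 (List.mem_filter.1 ht1).1)
    have h1 : cnt occ' x = cnt (occ.filter (fun t => !decide (t ∈ off)) ++ on) x :=
      cnt_congr _ _ hocc'nd hMnd hM x
    have hoffcnt : occ.countP
        (fun t => decide (t ∈ shiftLit x) && decide (t ∈ off)) = cnt off x := by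
      rw [cnt, List.countP_eq_length_filter, List.countP_eq_length_filter]
      refine length_eq_of_mem_iff _ _ (hoccnd.filter _) (hoffnd.filter _) (fun t => ?_)
      simp only [List.mem_filter, Bool.and_eq_true, decide_eq_true_eq]
      exact ⟨fun ⟨_, h2, h3⟩ => ⟨h3, h2⟩, fun ⟨h3, h2⟩ => ⟨hoffsub t h3, h2, h3⟩⟩
    have hpart := countP_partition occ (fun t => decide (t ∈ shiftLit x))
      (fun t => decide (t ∈ off))
    have h2 : cnt (occ.filter (fun t => !decide (t ∈ off)) ++ on) x
        = occ.countP (fun t => decide (t ∈ shiftLit x) && !decide (t ∈ off)) + cnt on x := by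
      simp [cnt, List.countP_append, List.countP_filter]
    rw [h1, h2]
    unfold cnt at hoffcnt hpart ⊢
    omega
  omega

-- ===== the round correspondence =====

-- the B loop state invariant
theorem loop_eq (S : PySem.Set (Int × Int)) (hS : S.Nodup) :
    ∀ (fuel : Nat) (occA occB : PySem.Set (Int × Int)) (counts : PySem.Dict (Int × Int) Int),
      occA.Nodup → occB.Nodup → (∀ x ∈ occA, x ∈ S) → (∀ x ∈ occB, x ∈ S) →
      (∀ x, x ∈ occA ↔ x ∈ occB) →
      (∀ x ∈ S, counts.getD x 0 = (cnt occB x : Int)) →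
      partOneLoop S occA fuel = altLoop S (nbDict S) occB counts fuel := by
  intro fuel
  induction fuel with
  | zero => intro _ _ _ _ _ _ _ _ _; rfl
  | succ fuel ih =>
    intro occA occB counts hndA hndB hsubA hsubB hAB hcounts
    have hdeceq : ∀ x, decNext occA x = decNext occB x := by
      intro x
      unfold decNext
      rw [cnt_congr occA occB hndA hndB hAB x]
      exact if_congr (hAB x) rfl rfl
    have hrmem : ∀ x, x ∈ partOneRound S occA ↔ (x ∈ S ∧ decNext occB x = true) := by
      intro x; rw [roundA_mem S occA hS hndA hsubA x, hdeceq x]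
    have hrnd := roundA_nodup S occA hS hndA hsubA
    have htonmem : ∀ s,
        s ∈ S.filter (fun s => !(PySem.Set.contains occB s) && (counts.getD s 0 == 0))
        ↔ (s ∈ S ∧ s ∉ occB ∧ cnt occB s = 0) := by
      intro s
      simp only [List.mem_filter, Bool.and_eq_true, Bool.not_eq_true']
      constructor
      · rintro ⟨hsS, hc, hz⟩
        have hgz : counts.getD s 0 = 0 := by simpa using hz
        rw [hcounts s hsS] at hgz
        refine ⟨hsS, fun hb => ?_, by exact_mod_cast hgz⟩
        rw [(PySem.Set.contains_iff _ _).2 hb] at hc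
        cases hc
      · rintro ⟨hsS, hnb, hz⟩
        refine ⟨hsS, ?_, ?_⟩
        · cases hcb : PySem.Set.contains occB s
          · rfl
          · exact absurd ((PySem.Set.contains_iff _ _).1 hcb) hnb
        · rw [hcounts s hsS]
          simp [hz]
    have htoffmem : ∀ s, s ∈ occB.filter (fun s => decide (4 ≤ counts.getD s 0))
        ↔ (s ∈ occB ∧ 4 ≤ cnt occB s) := by
      intro s
      simp only [List.mem_filter, decide_eq_true_eq]
      constructor
      · rintro ⟨hb, h4⟩
        rw [hcounts s (hsubB s hb)] at h4
        exact ⟨hb, by exact_mod_cast h4⟩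
      · rintro ⟨hb, h4⟩
        refine ⟨hb, ?_⟩
        rw [hcounts s (hsubB s hb)]
        exact_mod_cast h4
    have hstop : PySem.Set.equal occA (partOneRound S occA) =
        ((S.filter (fun s => !(PySem.Set.contains occB s) && (counts.getD s 0 == 0))).isEmpty &&
         (occB.filter (fun s => decide (4 ≤ counts.getD s 0))).isEmpty) := by
      rw [Bool.eq_iff_iff, PySem.Set.equal_iff, Bool.and_eq_true,
        List.isEmpty_iff, List.isEmpty_iff]
      constructor
      · intro he
        have hiff : ∀ x ∈ S, (x ∈ occB ↔ decNext occB x = true) := by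
          intro x hxS
          rw [← hAB x, he x, hrmem x]
          exact ⟨fun ⟨_, h⟩ => h, fun h => ⟨hxS, h⟩⟩
        constructor
        · rw [List.eq_nil_iff_forall_not_mem]
          intro s hs
          obtain ⟨hsS, hnb, hz⟩ := (htonmem s).1 hs
          exact hnb ((hiff s hsS).2 (by rw [decNext, if_neg hnb]; simp [hz]))
        · rw [List.eq_nil_iff_forall_not_mem]
          intro s hs
          obtain ⟨hb, h4⟩ := (htoffmem s).1 hs
          have hd := (hiff s (hsubB s hb)).1 hb
          rw [decNext, if_pos hb] at hd
          simp only [decide_eq_true_eq] at hd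
          omega
      · rintro ⟨hon, hoff⟩ x
        rw [hrmem x]
        by_cases hxS : x ∈ S
        · by_cases hxB : x ∈ occB
          · have h4 : cnt occB x < 4 := by
              by_contra h4
              exact (List.eq_nil_iff_forall_not_mem.1 hoff x)
                ((htoffmem x).2 ⟨hxB, by omega⟩)
            have hd : decNext occB x = true := by
              rw [decNext, if_pos hxB]; simp [h4]
            exact iff_of_true ((hAB x).2 hxB) ⟨hxS, hd⟩
          · have hz : cnt occB x ≠ 0 := fun hz =>
              (List.eq_nil_iff_forall_not_mem.1 hon x) ((htonmem x).2 ⟨hxS, hxB, hz⟩)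
            refine iff_of_false (fun hxA => hxB ((hAB x).1 hxA)) ?_
            rintro ⟨_, hd⟩
            rw [decNext, if_neg hxB] at hd
            simp only [decide_eq_true_eq] at hd
            exact hz hd
        · exact iff_of_false (fun hxA => hxS (hsubA x hxA)) (fun ⟨h, _⟩ => hxS h)
    simp only [partOneLoop, altLoop]
    rw [hstop]
    set ton := S.filter (fun s => !(PySem.Set.contains occB s) && (counts.getD s 0 == 0))
      with hton
    set toff := occB.filter (fun s => decide (4 ≤ counts.getD s 0)) with htoff
    by_cases hb : (ton.isEmpty && toff.isEmpty) = true
    · rw [if_pos hb, if_pos hb]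
      rw [length_eq_of_mem_iff occA occB hndA hndB hAB]
    · rw [if_neg hb, if_neg hb]
      rw [PySem.List.foldl_prod_mk (f := fun oc s => PySem.Set.add oc s)
        (g := fun c s => incNbrs (nbDict S) c s),
        PySem.List.foldl_prod_mk (f := fun oc s => PySem.Set.discard oc s)
        (g := fun c s => decNbrs (nbDict S) c s)]
      have tonnd : ton.Nodup := hS.filter _
      have toffnd : toff.Nodup := hndB.filter _
      have tonsubS : ∀ t ∈ ton, t ∈ S := fun t ht => ((htonmem t).1 ht).1
      have toffsubB : ∀ t ∈ toff, t ∈ occB := fun t ht => ((htoffmem t).1 ht).1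
      have hdisj : ∀ t ∈ ton, t ∉ occB := fun t ht => ((htonmem t).1 ht).2.1
      have hndB' : (toff.foldl PySem.Set.discard (ton.foldl PySem.Set.add occB)).Nodup :=
        nodup_foldl_discard _ _ (nodup_foldl_add' _ _ hndB)
      have hB'mem : ∀ x, x ∈ toff.foldl PySem.Set.discard (ton.foldl PySem.Set.add occB)
          ↔ ((x ∈ occB ∨ x ∈ ton) ∧ x ∉ toff) := by
        intro x
        rw [mem_foldl_discard, mem_foldl_add']
      have hAB' : ∀ x, x ∈ partOneRound S occA
          ↔ x ∈ toff.foldl PySem.Set.discard (ton.foldl PySem.Set.add occB) := by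
        intro x
        rw [hrmem x, hB'mem x]
        by_cases hxS : x ∈ S
        · by_cases hxB : x ∈ occB
          · constructor
            · rintro ⟨_, hd⟩
              rw [decNext, if_pos hxB] at hd
              simp only [decide_eq_true_eq] at hd
              refine ⟨Or.inl hxB, fun hoff => ?_⟩
              obtain ⟨_, h4⟩ := (htoffmem x).1 hoff
              omega
            · rintro ⟨_, hnoff⟩
              refine ⟨hxS, ?_⟩
              rw [decNext, if_pos hxB]
              simp only [decide_eq_true_eq]
              by_contra h4
              exact hnoff ((htoffmem x).2 ⟨hxB, by omega⟩)
          · constructor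
            · rintro ⟨_, hd⟩
              rw [decNext, if_neg hxB] at hd
              simp only [decide_eq_true_eq] at hd
              exact ⟨Or.inr ((htonmem x).2 ⟨hxS, hxB, hd⟩),
                fun hoff => hxB ((htoffmem x).1 hoff).1⟩
            · rintro ⟨(h | h), _⟩
              · exact absurd h hxB
              · obtain ⟨_, _, hz⟩ := (htonmem x).1 h
                exact ⟨hxS, by rw [decNext, if_neg hxB]; simp [hz]⟩
        · refine iff_of_false (fun ⟨h, _⟩ => hxS h) ?_
          rintro ⟨(h | h), _⟩
          · exact hxS (hsubB x h)
          · exact hxS ((htonmem x).1 h).1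
      have hsubA'' : ∀ x ∈ partOneRound S occA, x ∈ S := fun x hx => ((hrmem x).1 hx).1
      have hsubB'' : ∀ x ∈ toff.foldl PySem.Set.discard (ton.foldl PySem.Set.add occB),
          x ∈ S := by
        intro x hx
        obtain ⟨(h | h), _⟩ := (hB'mem x).1 hx
        · exact hsubB x h
        · exact tonsubS x h
      have hcounts' : ∀ x ∈ S,
          (toff.foldl (fun c s => decNbrs (nbDict S) c s)
            (ton.foldl (fun c s => incNbrs (nbDict S) c s) counts)).getD x 0
          = (cnt (toff.foldl PySem.Set.discard (ton.foldl PySem.Set.add occB)) x : Int) := by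
        intro x hxS
        have hinc : ton.foldl (fun c s => incNbrs (nbDict S) c s) counts
            = ton.foldl (fun c t =>
                (nbList S t).foldl (fun c n => c.modify n 0 (· + 1)) c) counts :=
          PySem.List.foldl_congr_mem _ _ _ _
            (fun c s hs => by rw [incNbrs, getD_nbDict S s (tonsubS s hs)])
        have hdecr : ∀ c0, toff.foldl (fun c s => decNbrs (nbDict S) c s) c0
            = toff.foldl (fun c t =>
                (nbList S t).foldl (fun c n => c.modify n 0 (· - 1)) c) c0 :=
          fun c0 => PySem.List.foldl_congr_mem _ _ _ _
            (fun c s hs => by rw [decNbrs, getD_nbDict S s (hsubB s (toffsubB s hs))])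
        rw [hinc, hdecr,
          getD_dec (nbList S) toff (fun t _ => nbList_nodup S t) _ x,
          getD_inc (nbList S) ton (fun t _ => nbList_nodup S t) counts x,
          hcounts x hxS]
        have hcp : ∀ (l : List (Int × Int)),
            l.countP (fun t => decide (x ∈ nbList S t)) = cnt l x := by
          intro l
          unfold cnt
          refine List.countP_congr (fun t _ => ?_)
          simp only [decide_eq_true_eq]
          rw [mem_nbList]
          exact ⟨fun ⟨h1, _⟩ => (shift_symm t x).1 h1,
            fun h => ⟨(shift_symm t x).2 h, hxS⟩⟩
        rw [hcp ton, hcp toff,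
          cnt_after_flips occB _ ton toff hndB hndB' tonnd toffnd hdisj toffsubB hB'mem x]
      exact ih (partOneRound S occA) _ _ hrnd hndB' hsubA'' hsubB'' hAB' hcounts'

-- ===== VERDICT (by name: the statement is the Claim_ definition above) =====
theorem part_one_spec : Claim_equal_part_one := by
  intro seats _hdom
  unfold Spec_part_one part_one part_one_alt
  have hS : (PySem.Set.ofList seats).Nodup := PySem.Set.nodup_ofList seats
  exact loop_eq _ hS _ PySem.Set.empty PySem.Set.empty (countsInit _)
    List.nodup_nil List.nodup_nil (by simp [PySem.Set.empty]) (by simp [PySem.Set.empty])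
    (fun _ => Iff.rfl) (fun x _ => by simp [getD_countsInit, cnt, PySem.Set.empty])
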